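-- pv_equiv track=rewrite | github.com/pypi-data/pypi-mirror-365 | packages/surfari/surfari-0.1.1-py3-none-any.whl/surfari/full_text_extractor.py | truncate_xpath_to_interactive
-- ===== SOURCE A (Python) =====
-- def truncate_xpath_to_interactive(full_xpath):
--     segments = [seg for seg in full_xpath.split('/') if seg.strip()]
--     last_interactive = -1
--     for i in range(len(segments) - 1, -1, -1):
--         if segments[i].startswith(('a[', 'button')) or segments[i] == 'a':
--             last_interactive = i
--             break
--     if last_interactive == -1:
--         return full_xpath
--     return '/' + '/'.join(segments[:last_interactive + 1])
-- ===== SOURCE B (Python) =====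
-- def truncate_xpath_to_interactive(full_xpath):
--     result = None
--     acc = ''
--     for seg in full_xpath.split('/'):
--         if not seg.strip():
--             continue
--         acc += '/' + seg
--         if seg.startswith(('a[', 'button')) or seg == 'a':
--             result = acc
--     return full_xpath if result is None else result
-- ===== Notes on version B (the rewrite author's own statement) =====
-- stated objective: idiomatic
-- what changed: A splits, filters, scans the segment indices backwards with an early break, then rebuilds the prefix with a slice and a join; B makes one forward pass over the split segments, growing the slash-joined path as it goes and remembering it at each interactive segment, so no index arithmetic, no slice and no join remain.
import Mathlib
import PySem

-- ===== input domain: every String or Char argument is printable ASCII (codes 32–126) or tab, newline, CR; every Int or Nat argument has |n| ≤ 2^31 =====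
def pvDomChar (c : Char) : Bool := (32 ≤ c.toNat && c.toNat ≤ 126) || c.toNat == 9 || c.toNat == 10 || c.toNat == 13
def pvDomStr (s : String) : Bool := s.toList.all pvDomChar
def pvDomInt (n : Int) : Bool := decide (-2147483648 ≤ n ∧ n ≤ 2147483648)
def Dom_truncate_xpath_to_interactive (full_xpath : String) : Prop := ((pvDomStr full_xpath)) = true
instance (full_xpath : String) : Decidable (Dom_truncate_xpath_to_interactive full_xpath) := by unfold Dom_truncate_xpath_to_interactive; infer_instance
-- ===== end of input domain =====

-- B replaces A's backward early-exit index loop plus slice/join reconstruction by one forward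
-- pass that grows the slash-joined prefix and remembers it at each interactive segment (idiomatic).

-- ===== PORT A =====
-- the predicate: seg.startswith(('a[', 'button')) or seg == 'a'
def pvInteractive (seg : String) : Bool :=
  PySem.Str.startswith seg "a[" || PySem.Str.startswith seg "button" || seg == "a"

-- A's backward loop with break: first index in the countdown list whose segment matches, else -1.
-- segments[i] is ported as (pyGet? …).getD "" — every index the range produces is in bounds.
def pvALoop (segs : List String) : List Int → Int
  | [] => -1
  | i :: rest =>
    if pvInteractive ((PySem.List.pyGet? segs i).getD "") then i else pvALoop segs rest

def truncate_xpath_to_interactive (full_xpath : String) : String :=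
  let segments := ((PySem.Str.split? full_xpath "/").getD []).filter
    (fun seg => !(PySem.Str.strip seg == ""))
  let last_interactive :=
    pvALoop segments (PySem.List.pyRange ((segments.length : Int) - 1) (-1) (-1))
  if last_interactive = -1 then full_xpath
  else "/" ++ PySem.Str.join "/" (PySem.List.slice segments none (some (last_interactive + 1)))

-- ===== PORT B =====
-- one forward fold: state = (acc = slash-joined path so far, result = last remembered prefix)
def pvBStep (st : String × Option String) (seg : String) : String × Option String :=
  if PySem.Str.strip seg == "" then st
  else
    let acc := st.1 ++ "/" ++ seg
    (acc, if pvInteractive seg then some acc else st.2)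

def truncate_xpath_to_interactive_alt (full_xpath : String) : String :=
  let st := ((PySem.Str.split? full_xpath "/").getD []).foldl pvBStep ("", none)
  match st.2 with
  | none => full_xpath
  | some r => r

-- ===== PRECONDITION & SPEC =====
def Spec_truncate_xpath_to_interactive (full_xpath : String) (out : String) : Prop := out = truncate_xpath_to_interactive_alt full_xpath
instance (full_xpath : String) (out : String) : Decidable (Spec_truncate_xpath_to_interactive full_xpath out) := by unfold Spec_truncate_xpath_to_interactive; infer_instance

-- ===== CLAIM (what is proved, stated in full; the proofs are below) =====
def Claim_equal_truncate_xpath_to_interactive : Prop := ∀ (full_xpath : String), Dom_truncate_xpath_to_interactive full_xpath → Spec_truncate_xpath_to_interactive full_xpath (truncate_xpath_to_interactive full_xpath)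

-- ===== LEMMAS AND PROOFS =====

-- B's step on a non-blank segment (the body of the fold after the blank-skip)
def pvGStep (st : String × Option String) (seg : String) : String × Option String :=
  let acc := st.1 ++ "/" ++ seg
  (acc, if pvInteractive seg then some acc else st.2)

theorem pvBStep_shape :
    pvBStep = fun (st : String × Option String) seg =>
      if (!(PySem.Str.strip seg == "")) = true then pvGStep st seg else st := by
  funext st seg
  unfold pvBStep pvGStep
  cases h : (PySem.Str.strip seg == "") <;> simp


theorem join_concat (sep : String) (xs : List String) (x : String) (h : xs ≠ []) :
    PySem.Str.join sep (xs ++ [x]) = PySem.Str.join sep xs ++ sep ++ x := by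
  induction xs with
  | nil => simp at h
  | cons a tl ih =>
    cases tl with
    | nil =>
      apply String.toList_inj.mp
      simp [PySem.Chars.join_cons_cons, PySem.Chars.join_singleton]
    | cons b tl' =>
      apply String.toList_inj.mp
      have h2 := congrArg String.toList (ih (by simp))
      simp [PySem.Chars.join_cons_cons] at h2 ⊢
      simp [h2]

theorem acc_concat (xs : List String) (x : String) :
    (if xs = [] then "" else "/" ++ PySem.Str.join "/" xs) ++ "/" ++ x =
      "/" ++ PySem.Str.join "/" (xs ++ [x]) := by
  by_cases h : xs = []
  · subst h
    apply String.toList_inj.mp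
    simp [PySem.Chars.join_singleton]
  · rw [if_neg h, join_concat "/" xs x h]
    apply String.toList_inj.mp
    simp

theorem pvALoop_irrel (x : String) (segs : List String) (l : List Int)
    (h : ∀ i ∈ l, 0 ≤ i ∧ i < (segs.length : Int)) :
    pvALoop (segs ++ [x]) l = pvALoop segs l := by
  induction l with
  | nil => rfl
  | cons i rest ih =>
    have hi := h i (by simp)
    obtain ⟨m, rfl⟩ : ∃ m : Nat, i = (m : Int) := ⟨i.toNat, by omega⟩
    have hget : PySem.List.pyGet? (segs ++ [x]) (m : Int) = PySem.List.pyGet? segs (m : Int) := by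
      rw [PySem.List.pyGet?_natCast, PySem.List.pyGet?_natCast,
        List.getElem?_append_left (by exact_mod_cast hi.2)]
    simp only [pvALoop, hget]
    split
    · rfl
    · exact ih (fun j hj => h j (by simp [hj]))

theorem pvALoop_range (segs : List String) (l : List Int)
    (h : ∀ i ∈ l, 0 ≤ i ∧ i < (segs.length : Int)) :
    pvALoop segs l = -1 ∨ (0 ≤ pvALoop segs l ∧ pvALoop segs l < (segs.length : Int)) := by
  induction l with
  | nil => left; rfl
  | cons i rest ih =>
    simp only [pvALoop]
    split
    · right; exact h i (by simp)
    · exact ih (fun j hj => h j (by simp [hj]))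

theorem pv_bounds (n : Nat) :
    ∀ i ∈ PySem.List.pyRange ((n : Int) - 1) (-1) (-1), 0 ≤ i ∧ i < (n : Int) := by
  intro i hi
  rw [PySem.List.mem_pyRange_neg_one] at hi
  omega

-- the combined invariant of both loops, by induction on the filtered list from the right
theorem pv_invariant (segs : List String) :
    segs.foldl pvGStep ("", (none : Option String)) =
      ((if segs = [] then "" else "/" ++ PySem.Str.join "/" segs),
       (if pvALoop segs (PySem.List.pyRange ((segs.length : Int) - 1) (-1) (-1)) = -1 then none
        else some ("/" ++ PySem.Str.join "/" (PySem.List.slice segs none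
          (some (pvALoop segs (PySem.List.pyRange ((segs.length : Int) - 1) (-1) (-1)) + 1)))))) := by
  induction segs using List.reverseRecOn with
  | nil =>
    simp [pvALoop]
  | append_singleton xs x ih =>
    have hlen : (((xs ++ [x]).length : Int) - 1) = (xs.length : Int) := by
      simp only [List.length_append, List.length_cons, List.length_nil]
      omega
    have hrange : PySem.List.pyRange (((xs ++ [x]).length : Int) - 1) (-1) (-1) =
        (xs.length : Int) :: PySem.List.pyRange ((xs.length : Int) - 1) (-1) (-1) := by
      rw [hlen, PySem.List.pyRange_neg_one_cons (by omega)]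
    have hget : PySem.List.pyGet? (xs ++ [x]) ((xs.length : Int)) = some x := by
      rw [PySem.List.pyGet?_natCast]
      simp
    have hfold : (xs ++ [x]).foldl pvGStep ("", (none : Option String)) =
        pvGStep (xs.foldl pvGStep ("", none)) x := by
      simp [List.foldl_append]
    rw [hfold, ih, hrange]
    simp only [pvALoop, hget, Option.getD_some]
    by_cases hP : pvInteractive x = true
    · -- the new last segment is interactive: index = xs.length
      rw [if_pos hP]
      have hne : ¬ ((xs.length : Int) = -1) := by omega
      rw [if_neg hne]
      have hslice : PySem.List.slice (xs ++ [x]) none (some ((xs.length : Int) + 1)) = xs ++ [x] := by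
        have h1 : ((xs.length : Int) + 1) = (((xs ++ [x]).length : Nat) : Int) := by
          simp only [List.length_append, List.length_cons, List.length_nil]
          omega
        rw [h1, PySem.List.slice_to_natCast]
        simp
      rw [hslice, if_neg (show ¬(xs ++ [x] = []) by simp)]
      simp only [pvGStep, hP, if_true, Prod.mk.injEq]
      exact ⟨acc_concat xs x, by rw [acc_concat xs x]⟩
    · -- x not interactive: last index and result come from xs alone
      rw [if_neg hP]
      rw [pvALoop_irrel x xs _ (pv_bounds xs.length)]
      simp only [pvGStep, hP, Bool.false_eq_true, if_false, Prod.mk.injEq]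
      refine ⟨by simpa using acc_concat xs x, ?_⟩
      by_cases hA : pvALoop xs (PySem.List.pyRange ((xs.length : Int) - 1) (-1) (-1)) = -1
      · simp [hA]
      · rw [if_neg hA, if_neg hA]
        rcases pvALoop_range xs _ (pv_bounds xs.length) with h1 | h1
        · exact absurd h1 hA
        · set k := pvALoop xs (PySem.List.pyRange ((xs.length : Int) - 1) (-1) (-1)) with hk
          have hslice : PySem.List.slice (xs ++ [x]) none (some (k + 1)) =
              PySem.List.slice xs none (some (k + 1)) := by
            obtain ⟨m, hm⟩ : ∃ m : Nat, k + 1 = (m : Int) := ⟨(k + 1).toNat, by omega⟩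
            rw [hm, PySem.List.slice_to_natCast, PySem.List.slice_to_natCast,
              List.take_append_of_le_length (by omega)]
          rw [hslice]

-- ===== VERDICT (by name: the statement is the Claim_ definition above) =====
theorem truncate_xpath_to_interactive_spec : Claim_equal_truncate_xpath_to_interactive := by
  intro s _
  unfold Spec_truncate_xpath_to_interactive
  simp only [truncate_xpath_to_interactive, truncate_xpath_to_interactive_alt]
  rw [pvBStep_shape, PySem.List.foldl_if_eq_foldl_filter]
  set segs := ((PySem.Str.split? s "/").getD []).filter (fun seg => !(PySem.Str.strip seg == "")) with hs
  rw [pv_invariant segs]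
  by_cases hA : pvALoop segs (PySem.List.pyRange ((segs.length : Int) - 1) (-1) (-1)) = -1
  · simp [hA]
  · simp [hA]
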